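-- pv_equiv track=rewrite | github.com/vinhisreal/TKN_algorithm | TKN.py | calculate_psu
-- ===== SOURCE A (Python) =====
-- def calculate_utility_of_itemset(transaction: dict, itemset: list) -> float:
--     """
--     Calculate the total utility of an itemset in a given transaction.
--
--     Parameters:
--     transaction (dict): A dictionary representing a transaction, where keys are item IDs and values are their quantities/profits.
--     itemset (list): A list of item IDs representing the itemset for which the utility needs to be calculated.
--
--     Returns:
--     float: The total utility of the itemset in the given transaction. If any item in the itemset is not found in the transaction, the function returns 0.
--     """
--     total_utility = 0
--
--     if itemset == []:
--         return 0
--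
--     for item in itemset:
--         # Check if the item is in the transaction and calculate its utility
--         if item in transaction:
--             utility = transaction[item]
--             total_utility += utility  # Add the utility of the item to the total
--         else:
--             return 0
--     return total_utility
--
-- def calculate_psu(sorted_database: list, X: list, target_item: str) -> float:
--     """
--     Calculate the PSU value for a set X and a target item in a sorted transaction database.
--
--     Parameters:
--     sorted_database (list): A list of transactions, where each transaction is a dictionary of items and their utilities.
--     X (list): A list of item IDs representing the itemset for which the utility needs to be calculated.
--     target_item (str): The ID of the target item for which the PSU value needs to be calculated.
--
--     Returns:
--     float: The PSU value for the given set X and target item in the sorted transaction database.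
--     """
--     psu = 0
--
--     # Iterate through each transaction in the database
--     for transaction in sorted_database:
--         if target_item in transaction:  # If the transaction contains the target_item
--             start_counting = False
--             item_utility = 0
--             rru = 0
--
--             # Iterate through all items in the transaction
--             for i in transaction:
--
--                 # Calculate the combined utility of the itemset X in this transaction
--                 if (all(item in transaction for item in X)) or X == []:
--                     # Start calculating utility after encountering the target_item
--                     if i == target_item:
--                         start_counting = True
--                         item_utility = transaction[i] + calculate_utility_of_itemset(
--                             transaction, X
--                         )
--                     elif start_counting and transaction[i] > 0:
--                         rru += transaction[i]  # Remaining utility after the target_item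
--
--             # Add the utility of the psu
--             psu += item_utility + rru
--
--     return psu
-- ===== SOURCE B (Python) =====
-- def calculate_psu(sorted_database: list, X: list, target_item: str) -> float:
--     total = 0
--     for transaction in sorted_database:
--         if target_item in transaction and (not X or all(x in transaction for x in X)):
--             acc = 0
--             # scan the transaction back-to-front, accumulating positive utilities,
--             # and stop as soon as the target is reached from the right
--             for k in reversed(list(transaction)):
--                 if k == target_item:
--                     total += transaction[k] + sum(transaction[x] for x in X) + acc
--                     break
--                 if transaction[k] > 0:
--                     acc += transaction[k]
--     return total
-- ===== Notes on version B (the rewrite author's own statement) =====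
-- stated objective: alternative
-- what changed: Replaced A's forward walk with a start_counting flag (re-testing the constant subset condition at every key) by a back-to-front scan with early exit: positive utilities are accumulated from the end of the transaction and the scan stops the moment it reaches the target from the right, adding target utility, the X-sum and the accumulator in one step.
import Mathlib
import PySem

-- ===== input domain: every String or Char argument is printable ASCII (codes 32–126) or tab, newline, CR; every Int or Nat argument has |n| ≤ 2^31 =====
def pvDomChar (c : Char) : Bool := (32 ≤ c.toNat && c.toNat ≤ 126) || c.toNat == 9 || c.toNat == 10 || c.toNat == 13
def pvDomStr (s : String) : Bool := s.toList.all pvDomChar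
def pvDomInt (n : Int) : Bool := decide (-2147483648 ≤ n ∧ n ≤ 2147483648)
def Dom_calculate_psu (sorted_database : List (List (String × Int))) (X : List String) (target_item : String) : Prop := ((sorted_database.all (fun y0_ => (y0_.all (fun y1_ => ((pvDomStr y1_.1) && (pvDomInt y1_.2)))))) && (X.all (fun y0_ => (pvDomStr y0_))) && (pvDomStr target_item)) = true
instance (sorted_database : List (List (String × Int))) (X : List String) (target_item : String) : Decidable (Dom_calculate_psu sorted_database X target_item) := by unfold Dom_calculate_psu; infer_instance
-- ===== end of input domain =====

-- B replaces A's forward walk with a start_counting flag (re-testing the constant subset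
-- condition at every key) by a back-to-front scan with early exit that accumulates the
-- positive utilities until it reaches the target from the right. Objective: alternative.

-- ===== PORT A =====
-- calculate_utility_of_itemset's loop with early return 0 on a missing item
def pvUtilLoop (t : PySem.Dict String Int) : List String → Int → Int
  | [], acc => acc
  | item :: rest, acc =>
    if t.contains item then pvUtilLoop t rest (acc + t.getD item 0) else 0

def pvUtilOfItemset (t : PySem.Dict String Int) (X : List String) : Int :=
  if X = [] then 0 else pvUtilLoop t X 0

-- the body of A's inner `for i in transaction` loop, state (start_counting, item_utility, rru)
def pvInnerStep (t : PySem.Dict String Int) (X : List String) (target : String)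
    (s : Bool × Int × Int) (i : String) : Bool × Int × Int :=
  if X.all (fun item => t.contains item) || X = [] then
    if i = target then (true, t.getD i 0 + pvUtilOfItemset t X, s.2.2)
    else if s.1 && decide (0 < t.getD i 0) then (s.1, s.2.1, s.2.2 + t.getD i 0)
    else s
  else s

def calculate_psu (sorted_database : List (List (String × Int))) (X : List String) (target_item : String) : Int :=
  sorted_database.foldl (fun psu tl =>
    let t := PySem.Dict.mk tl
    if t.contains target_item then
      let r := t.keys.foldl (pvInnerStep t X target_item) (false, 0, 0)
      psu + (r.2.1 + r.2.2)
    else psu) 0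

-- ===== PORT B =====
-- B's reversed inner loop with break: accumulate positive utilities until the target is hit;
-- on the break, the transaction contributes target utility + the X-sum + the accumulator
def pvRevScan (t : PySem.Dict String Int) (X : List String) (target : String) : List String → Int → Int
  | [], _ => 0
  | k :: rest, acc =>
    if k = target then t.getD k 0 + X.foldl (fun a x => a + t.getD x 0) 0 + acc
    else if 0 < t.getD k 0 then pvRevScan t X target rest (acc + t.getD k 0)
    else pvRevScan t X target rest acc

def calculate_psu_alt (sorted_database : List (List (String × Int))) (X : List String) (target_item : String) : Int :=
  sorted_database.foldl (fun total tl =>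
    let t := PySem.Dict.mk tl
    if t.contains target_item && (X.isEmpty || X.all (fun item => t.contains item)) then
      total + pvRevScan t X target_item t.keys.reverse 0
    else total) 0

-- ===== PRECONDITION & SPEC =====
-- Pre_ excludes association lists with a duplicate key inside one transaction: the argument encodes a
-- Python dict, which cannot have duplicate keys, so no Python call ever passes such an input.
def Pre_calculate_psu (sorted_database : List (List (String × Int))) (X : List String) (target_item : String) : Prop :=
  ∀ tl ∈ sorted_database, (tl.map Prod.fst).Nodup
instance (sorted_database : List (List (String × Int))) (X : List String) (target_item : String) : Decidable (Pre_calculate_psu sorted_database X target_item) := by unfold Pre_calculate_psu; infer_instance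

def pvWitness_calculate_psu : (List (List (String × Int))) × List String × String :=
  ([[("a", 2), ("b", 3), ("c", -1)]], ["a"], "b")

def Spec_calculate_psu (sorted_database : List (List (String × Int))) (X : List String) (target_item : String) (out : Int) : Prop := out = calculate_psu_alt sorted_database X target_item
instance (sorted_database : List (List (String × Int))) (X : List String) (target_item : String) (out : Int) : Decidable (Spec_calculate_psu sorted_database X target_item out) := by unfold Spec_calculate_psu; infer_instance

-- ===== CLAIM (what is proved, stated in full; the proofs are below) =====
def Claim_equal_calculate_psu : Prop := ∀ (sorted_database : List (List (String × Int))) (X : List String) (target_item : String), Dom_calculate_psu sorted_database X target_item → Pre_calculate_psu sorted_database X target_item → Spec_calculate_psu sorted_database X target_item (calculate_psu sorted_database X target_item)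

-- ===== LEMMAS AND PROOFS =====

-- the step A's rru accumulation performs after the flag is set (also what B's scan accumulates)
def pvRruStep (t : PySem.Dict String Int) (a : Int) (k : String) : Int :=
  if 0 < t.getD k 0 then a + t.getD k 0 else a

-- if the subset condition is false, A's inner loop never changes its state
lemma foldl_innerStep_cond_false (t : PySem.Dict String Int) (X : List String) (target : String)
    (hc : (X.all (fun item => t.contains item) || decide (X = [])) = false) :
    ∀ (l : List String) (s : Bool × Int × Int), l.foldl (pvInnerStep t X target) s = s := by
  intro l
  induction l with
  | nil => intro s; rfl
  | cons i l ih =>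
      intro s
      simp only [List.foldl_cons, pvInnerStep]
      rw [if_neg (by simp [hc])]
      exact ih s

-- before the target is met, A's state (false, a, b) is unchanged
lemma foldl_innerStep_pre (t : PySem.Dict String Int) (X : List String) (target : String)
    (l : List String) (hne : target ∉ l) (a b : Int) :
    l.foldl (pvInnerStep t X target) (false, a, b) = (false, a, b) := by
  induction l with
  | nil => rfl
  | cons i l ih =>
      simp only [List.mem_cons, not_or] at hne
      simp only [List.foldl_cons, pvInnerStep]
      split_ifs with h1 h2 <;>
        first
          | exact absurd h2.symm hne.1
          | exact ih hne.2
          | simp_all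

-- after the target, A's state accumulates exactly the positive-utility sum
lemma foldl_innerStep_post (t : PySem.Dict String Int) (X : List String) (target : String)
    (l : List String) (hne : target ∉ l) (u r : Int)
    (hc : (X.all (fun item => t.contains item) || decide (X = [])) = true) :
    l.foldl (pvInnerStep t X target) (true, u, r) = (true, u, l.foldl (pvRruStep t) r) := by
  induction l generalizing r with
  | nil => rfl
  | cons i l ih =>
      simp only [List.mem_cons, not_or] at hne
      simp only [List.foldl_cons, pvInnerStep, pvRruStep]
      rw [if_pos (by simp_all)]
      rw [if_neg (fun h => hne.1 h.symm)]
      by_cases hp : 0 < t.getD i 0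
      · simp only [hp, decide_true, Bool.and_self, if_true]
        exact ih hne.2 _
      · simp only [hp, decide_false, Bool.and_false, if_false]
        exact ih hne.2 _

-- A's early-return utility loop is a plain sum when every item of X is present
lemma utilLoop_eq_foldl (t : PySem.Dict String Int) (X : List String)
    (h : ∀ x ∈ X, t.contains x = true) (acc : Int) :
    pvUtilLoop t X acc = X.foldl (fun a x => a + t.getD x 0) acc := by
  induction X generalizing acc with
  | nil => rfl
  | cons x l ih =>
      simp only [pvUtilLoop, List.foldl_cons]
      rw [if_pos (h x (List.mem_cons_self))]
      exact ih (fun y hy => h y (List.mem_cons_of_mem _ hy)) _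

lemma utilOfItemset_eq (t : PySem.Dict String Int) (X : List String)
    (h : X = [] ∨ ∀ x ∈ X, t.contains x = true) :
    pvUtilOfItemset t X = X.foldl (fun a x => a + t.getD x 0) 0 := by
  rcases h with h | h
  · subst h; rfl
  · unfold pvUtilOfItemset
    split_ifs with hX
    · subst hX; rfl
    · exact utilLoop_eq_foldl t X h 0

-- the rru fold shifts its accumulator out front
lemma foldl_rruStep_shift (t : PySem.Dict String Int) (l : List String) (acc : Int) :
    l.foldl (pvRruStep t) acc = acc + l.foldl (pvRruStep t) 0 := by
  induction l generalizing acc with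
  | nil => simp
  | cons k l ih =>
      simp only [List.foldl_cons, pvRruStep]
      by_cases hp : 0 < t.getD k 0
      · rw [if_pos hp, if_pos hp, ih (acc + t.getD k 0), ih (0 + t.getD k 0)]; ring
      · rw [if_neg hp, if_neg hp, ih acc]

-- hence the rru sum is reversal-invariant
lemma foldl_rruStep_reverse (t : PySem.Dict String Int) (l : List String) :
    l.reverse.foldl (pvRruStep t) 0 = l.foldl (pvRruStep t) 0 := by
  induction l with
  | nil => rfl
  | cons k l ih =>
      rw [List.reverse_cons, List.foldl_append, List.foldl_cons, List.foldl_nil, ih,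
          List.foldl_cons, foldl_rruStep_shift t l (pvRruStep t 0 k)]
      unfold pvRruStep
      split_ifs with hp <;> ring

-- B's scan on a list whose first target occurrence splits it as l ++ target :: m
lemma revScan_split (t : PySem.Dict String Int) (X : List String) (target : String)
    (l m : List String) (hl : target ∉ l) (acc : Int) :
    pvRevScan t X target (l ++ target :: m) acc
      = t.getD target 0 + X.foldl (fun a x => a + t.getD x 0) 0 + l.foldl (pvRruStep t) acc := by
  induction l generalizing acc with
  | nil => simp [pvRevScan]
  | cons k l ih =>
      simp only [List.mem_cons, not_or] at hl
      simp only [List.cons_append, pvRevScan, List.foldl_cons, pvRruStep]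
      rw [if_neg (fun h => hl.1 h.symm)]
      by_cases hp : 0 < t.getD k 0
      · rw [if_pos hp, if_pos hp, ih hl.2]
      · rw [if_neg hp, if_neg hp, ih hl.2]

-- the per-transaction bodies agree on every transaction without duplicate keys
lemma body_eq (X : List String) (target : String) (psu : Int) (tl : List (String × Int))
    (hnd : (tl.map Prod.fst).Nodup) :
    (let t := PySem.Dict.mk tl
     if t.contains target then
       let r := t.keys.foldl (pvInnerStep t X target) (false, 0, 0)
       psu + (r.2.1 + r.2.2)
     else psu)
    =
    (let t := PySem.Dict.mk tl
     if t.contains target && (X.isEmpty || X.all (fun item => t.contains item)) then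
       psu + pvRevScan t X target t.keys.reverse 0
     else psu) := by
  set t := PySem.Dict.mk tl with ht
  by_cases hcontains : t.contains target = true
  case neg =>
    simp only [Bool.not_eq_true] at hcontains
    simp [hcontains]
  case pos =>
    have hkeysnd : t.keys.Nodup := by
      simpa [ht, PySem.Dict.keys] using hnd
    by_cases hc : (X.all (fun item => t.contains item) || decide (X = [])) = true
    case neg =>
      -- inner condition is false: A's state stays (false,0,0), B's guard is false
      simp only [Bool.or_eq_true, decide_eq_true_eq, not_or, Bool.not_eq_true] at hc
      obtain ⟨hall, hXne⟩ := hc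
      have hfold := foldl_innerStep_cond_false t X target (by simp [hall, hXne]) t.keys (false, 0, 0)
      simp [hcontains, hfold, hall, List.isEmpty_iff, hXne]
    case pos =>
      -- condition holds: split the key list around the (unique) target occurrence
      have hmem : target ∈ t.keys := (PySem.Dict.contains_iff_mem_keys t target).mp hcontains
      rcases List.mem_iff_append.mp hmem with ⟨pre, suf, hsplit⟩
      have hnd' : (pre ++ target :: suf).Nodup := hsplit ▸ hkeysnd
      have hpre : target ∉ pre := fun h =>
        (List.disjoint_of_nodup_append hnd') h List.mem_cons_self
      have hsufn : target ∉ suf := by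
        have := (List.nodup_cons.mp hnd'.of_append_right).1
        exact this
      have hallmem : X = [] ∨ ∀ x ∈ X, t.contains x = true := by
        rcases Bool.or_eq_true_iff.mp hc with h | h
        · right; intro x hx; exact List.all_eq_true.mp h x hx
        · left; exact of_decide_eq_true h
      -- A's inner fold in closed form
      have hA : t.keys.foldl (pvInnerStep t X target) (false, 0, 0)
          = (true, t.getD target 0 + pvUtilOfItemset t X, suf.foldl (pvRruStep t) 0) := by
        have hstep : pvInnerStep t X target (false, 0, 0) target
            = (true, t.getD target 0 + pvUtilOfItemset t X, 0) := by
          simp [pvInnerStep, hc]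
        rw [hsplit, show pre ++ target :: suf = (pre ++ [target]) ++ suf by simp,
            List.foldl_append, List.foldl_append]
        rw [foldl_innerStep_pre t X target pre hpre 0 0]
        simp only [List.foldl_cons, List.foldl_nil, hstep]
        exact foldl_innerStep_post t X target suf hsufn _ _ hc
      -- B's reversed scan in closed form
      have hB : pvRevScan t X target t.keys.reverse 0
          = t.getD target 0 + X.foldl (fun a x => a + t.getD x 0) 0 + suf.foldl (pvRruStep t) 0 := by
        have hrev : t.keys.reverse = suf.reverse ++ target :: pre.reverse := by
          simp [hsplit]
        rw [hrev, revScan_split t X target suf.reverse pre.reverse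
              (by simpa using hsufn) 0, foldl_rruStep_reverse]
      have hguard : (t.contains target && (X.isEmpty || X.all (fun item => t.contains item))) = true := by
        rcases Bool.or_eq_true_iff.mp hc with h | h
        · simp [hcontains, h]
        · simp [hcontains, of_decide_eq_true h]
      have hguard' : (true && (X.isEmpty || X.all fun item => t.contains item)) = true := by
        simpa [hcontains] using hguard
      simp only [hcontains, if_true, hguard', hA, hB, utilOfItemset_eq t X hallmem]

-- ===== VERDICT (by name: the statement is the Claim_ definition above) =====
theorem calculate_psu_spec : Claim_equal_calculate_psu := by
  intro db X target _ hpre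
  unfold Spec_calculate_psu calculate_psu calculate_psu_alt
  exact PySem.List.foldl_congr_mem db _ _ 0 (fun psu tl htl => body_eq X target psu tl (hpre tl htl))
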